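-- pv_equiv track=rewrite | github.com/DDDdreamer/HappyThirteenWater | ThirteenWater.py | ShuangGuaiChongSan
-- ===== SOURCE A (Python) =====
-- def ShuangGuaiChongSan(cards):
--     duizi_num = 0
--     santiao_num = 0
--     card_dic = {'2':0,'3':0,'4':0,'5':0,'6':0,'7':0,'8':0,'9':0,'10':0,'J':0,'Q':0,'K':0,'A':0}
--     for lst_i in cards:
--         lst_i = lst_i.strip('*')
--         lst_i = lst_i.strip('#')
--         lst_i = lst_i.strip('$')
--         lst_i = lst_i.strip('&')
--         card_dic[lst_i] += 1
--         if card_dic[lst_i] == 2: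
--             duizi_num += 1
--         if card_dic[lst_i] == 3:
--             santiao_num += 1
--             duizi_num -= 1
--     if duizi_num == 3 and santiao_num == 2:
--         return True
--     return False
-- ===== SOURCE B (Python) =====
-- def ShuangGuaiChongSan(cards):
--     # Pass 1: pure counting into the same fixed-key dict (unknown ranks still KeyError).
--     card_dic = {'2':0,'3':0,'4':0,'5':0,'6':0,'7':0,'8':0,'9':0,'10':0,'J':0,'Q':0,'K':0,'A':0}
--     for lst_i in cards:
--         lst_i = lst_i.strip('*')
--         lst_i = lst_i.strip('#')
--         lst_i = lst_i.strip('$')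
--         lst_i = lst_i.strip('&')
--         card_dic[lst_i] += 1
--     # Pass 2: classify the counts.
--     duizi_num = 0
--     santiao_num = 0
--     for v in card_dic.values():
--         if v == 2:
--             duizi_num += 1
--         elif v >= 3:
--             santiao_num += 1
--     return duizi_num == 3 and santiao_num == 2
-- ===== Notes on version B (the rewrite author's own statement) =====
-- stated objective: simpler
-- what changed: Replaces A's interleaved pair/triple bookkeeping (incrementing duizi at count 2 and moving it to santiao at count 3 inside the counting loop) with two separate passes: one pure counting loop, then one classification pass over the dict's values counting exact pairs (v == 2) and triples-or-more (v >= 3).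
import Mathlib
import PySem

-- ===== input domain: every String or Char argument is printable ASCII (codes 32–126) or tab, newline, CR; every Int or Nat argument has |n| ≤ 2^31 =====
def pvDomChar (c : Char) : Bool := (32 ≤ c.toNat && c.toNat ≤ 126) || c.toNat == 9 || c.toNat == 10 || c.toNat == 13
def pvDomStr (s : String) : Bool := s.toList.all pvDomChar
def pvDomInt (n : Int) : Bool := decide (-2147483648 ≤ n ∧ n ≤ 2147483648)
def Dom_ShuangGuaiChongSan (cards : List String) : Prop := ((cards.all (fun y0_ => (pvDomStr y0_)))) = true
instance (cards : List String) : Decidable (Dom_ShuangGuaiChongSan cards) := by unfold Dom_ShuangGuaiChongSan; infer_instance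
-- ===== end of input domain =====

-- B replaces A's single loop with interleaved pair/triple bookkeeping by two separate passes
-- (count into the fixed-key dict, then classify its values); same cost, different decomposition.


-- ===== PORT A =====
-- the four sequential strip('*')/('#')/('$')/('&') calls, shared verbatim by both Pythons
def sgcsStrip (s : String) : String :=
  PySem.Str.stripChars (PySem.Str.stripChars (PySem.Str.stripChars (PySem.Str.stripChars s "*") "#") "$") "&"

-- the fixed-key dict literal {'2':0, …, 'A':0}, shared verbatim by both Pythons
def sgcsInit : PySem.Dict String Int :=
  PySem.Dict.ofList [("2",0),("3",0),("4",0),("5",0),("6",0),("7",0),("8",0),("9",0),("10",0),("J",0),("Q",0),("K",0),("A",0)]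

-- card_dic[lst_i] += 1 raises KeyError when the stripped card is not one of the 13 keys: Pre_ excludes exactly that.
def ShuangGuaiChongSan (cards : List String) : Bool :=
  let r := cards.foldl (fun st lst_i =>
    let k := sgcsStrip lst_i
    let d := st.1.insert k (st.1.getD k 0 + 1)
    let c := d.getD k 0
    let duizi := if c == 2 then st.2.1 + 1 else st.2.1
    let santiao := if c == 3 then st.2.2 + 1 else st.2.2
    let duizi := if c == 3 then duizi - 1 else duizi
    (d, duizi, santiao)) (sgcsInit, (0 : Int), (0 : Int))
  if r.2.1 == 3 && r.2.2 == 2 then true else false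

-- ===== PORT B =====
def ShuangGuaiChongSan_alt (cards : List String) : Bool :=
  let d := cards.foldl (fun d lst_i =>
    let k := sgcsStrip lst_i
    d.insert k (d.getD k 0 + 1)) sgcsInit
  let r := d.values.foldl (fun p v =>
    if v == 2 then (p.1 + 1, p.2)
    else if 3 ≤ v then (p.1, p.2 + 1)
    else p) ((0 : Int), (0 : Int))
  decide (r.1 = 3 ∧ r.2 = 2)

-- ===== PRECONDITION & SPEC =====
-- Pre_ excludes exactly the inputs on which A raises KeyError: a card whose stripped form is not one of the 13 ranks.
def Pre_ShuangGuaiChongSan (cards : List String) : Prop :=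
  ∀ s ∈ cards, sgcsStrip s ∈ ["2","3","4","5","6","7","8","9","10","J","Q","K","A"]
instance (cards : List String) : Decidable (Pre_ShuangGuaiChongSan cards) := by unfold Pre_ShuangGuaiChongSan; infer_instance
def pvWitness_ShuangGuaiChongSan : List String :=
  ["2","2","*3*","3","4#","4","J","J","J&","Q","Q","$Q$"]

def Spec_ShuangGuaiChongSan (cards : List String) (out : Bool) : Prop := out = ShuangGuaiChongSan_alt cards
instance (cards : List String) (out : Bool) : Decidable (Spec_ShuangGuaiChongSan cards out) := by unfold Spec_ShuangGuaiChongSan; infer_instance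

-- ===== CLAIM (what is proved, stated in full; the proofs are below) =====
def Claim_equal_ShuangGuaiChongSan : Prop := ∀ (cards : List String), Dom_ShuangGuaiChongSan cards → Pre_ShuangGuaiChongSan cards → Spec_ShuangGuaiChongSan cards (ShuangGuaiChongSan cards)

-- ===== LEMMAS AND PROOFS =====

-- replacing the value at one key of a Nodup list changes a countP of the mapped list by the swap of the two if-terms
lemma countP_map_update (q : Int → Bool) (l : List String) (g : String → Int) (a : String) (w : Int)
    (hnd : l.Nodup) (ha : a ∈ l) :
    (l.map (fun x => if x = a then w else g x)).countP q + (if q (g a) then 1 else 0)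
      = (l.map g).countP q + (if q w then 1 else 0) := by
  induction l with
  | nil => cases ha
  | cons h t ih =>
    simp only [List.map_cons, List.countP_cons]
    rcases List.mem_cons.mp ha with rfl | hat
    · have hnt : a ∉ t := (List.nodup_cons.mp hnd).1
      have ht : t.map (fun x => if x = a then w else g x) = t.map g :=
        List.map_congr_left (fun x hx => by rw [if_neg]; rintro rfl; exact hnt hx)
      rw [ht, if_pos rfl]
      omega
    · have hha : h ≠ a := by rintro rfl; exact (List.nodup_cons.mp hnd).1 hat
      rw [if_neg hha]
      have := ih (List.nodup_cons.mp hnd).2 hat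
      omega

-- overwriting an existing key: how any countP of the values changes
lemma values_countP_insert (q : Int → Bool) (d : PySem.Dict String Int) (k : String) (w : Int)
    (hnd : d.keys.Nodup) (hk : k ∈ d.keys) :
    ((d.insert k w).values.countP q) + (if q (d.getD k 0) then 1 else 0)
      = d.values.countP q + (if q w then 1 else 0) := by
  have hc : d.contains k = true := (PySem.Dict.contains_iff_mem_keys d k).mpr hk
  have hkeys : (d.insert k w).keys = d.keys := PySem.Dict.keys_insert_of_contains d w hc
  have hnd' : (d.insert k w).keys.Nodup := hkeys ▸ hnd
  rw [PySem.Dict.values_eq_map_keys _ hnd' 0, PySem.Dict.values_eq_map_keys d hnd 0, hkeys]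
  have hmap : d.keys.map (fun x => (d.insert k w).getD x 0)
      = d.keys.map (fun x => if x = k then w else d.getD x 0) :=
    List.map_congr_left (fun x _ => by rw [PySem.Dict.getD_insert])
  rw [hmap]
  exact countP_map_update q d.keys (fun x => d.getD x 0) k w hnd hk

def sgcsQ2 (v : Int) : Bool := v == 2
def sgcsQ3 (v : Int) : Bool := decide (3 ≤ v)

-- B's counting step and A's combined step, as named functions (definitionally the ports' lambdas)
def sgcsStepD (d : PySem.Dict String Int) (lst_i : String) : PySem.Dict String Int :=
  let k := sgcsStrip lst_i
  d.insert k (d.getD k 0 + 1)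

def sgcsStepA (st : PySem.Dict String Int × Int × Int) (lst_i : String) : PySem.Dict String Int × Int × Int :=
  let k := sgcsStrip lst_i
  let d := st.1.insert k (st.1.getD k 0 + 1)
  let c := d.getD k 0
  let duizi := if c == 2 then st.2.1 + 1 else st.2.1
  let santiao := if c == 3 then st.2.2 + 1 else st.2.2
  let duizi := if c == 3 then duizi - 1 else duizi
  (d, duizi, santiao)

lemma keys_stepD (d : PySem.Dict String Int) (x : String) (hx : sgcsStrip x ∈ d.keys) :
    (sgcsStepD d x).keys = d.keys :=
  PySem.Dict.keys_insert_of_contains d _ ((PySem.Dict.contains_iff_mem_keys d _).mpr hx)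

-- A's loop = B's counting loop on the dict component, and its counters are the differences of
-- the pair-count (values = 2) and the triple-or-more-count (values ≥ 3) of the dict's values.
lemma loopA (l : List String) : ∀ (d : PySem.Dict String Int) (z s : Int),
    d.keys.Nodup → (∀ x ∈ l, sgcsStrip x ∈ d.keys) →
    l.foldl sgcsStepA (d, z, s) =
      (l.foldl sgcsStepD d,
       z + ((l.foldl sgcsStepD d).values.countP sgcsQ2 : Int) - (d.values.countP sgcsQ2 : Int),
       s + ((l.foldl sgcsStepD d).values.countP sgcsQ3 : Int) - (d.values.countP sgcsQ3 : Int)) := by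
  induction l with
  | nil => intro d z s _ _; simp
  | cons x t ih =>
    intro d z s hnd hmem
    have hx : sgcsStrip x ∈ d.keys := hmem x (List.mem_cons_self ..)
    set k := sgcsStrip x with hk
    set v := d.getD k 0 with hv
    have hkeys := keys_stepD d x hx
    have hnd1 : (sgcsStepD d x).keys.Nodup := hkeys ▸ hnd
    have hmem1 : ∀ y ∈ t, sgcsStrip y ∈ (sgcsStepD d x).keys :=
      fun y hy => hkeys ▸ hmem y (List.mem_cons_of_mem _ hy)
    have hc2 := values_countP_insert sgcsQ2 d k (v + 1) hnd hx
    have hc3 := values_countP_insert sgcsQ3 d k (v + 1) hnd hx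
    have hstep : sgcsStepA (d, z, s) x =
        (sgcsStepD d x,
         z + ((sgcsStepD d x).values.countP sgcsQ2 : Int) - (d.values.countP sgcsQ2 : Int),
         s + ((sgcsStepD d x).values.countP sgcsQ3 : Int) - (d.values.countP sgcsQ3 : Int)) := by
      have hget : (d.insert k (v + 1)).getD k 0 = v + 1 := PySem.Dict.getD_insert_self ..
      simp only [sgcsStepA, sgcsStepD, ← hk, ← hv, hget]
      refine Prod.ext rfl (Prod.ext ?_ ?_) <;>
      · simp only [sgcsQ2, sgcsQ3, beq_iff_eq, decide_eq_true_eq, ← hv] at hc2 hc3 ⊢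
        split_ifs at hc2 hc3 ⊢ <;> omega
    rw [List.foldl_cons, hstep, ih (sgcsStepD d x) _ _ hnd1 hmem1]
    simp only [List.foldl_cons]
    refine Prod.ext rfl (Prod.ext ?_ ?_) <;> ring

-- B's classification pass computes exactly those two counts
lemma loopB (vals : List Int) : ∀ (a b : Int),
    vals.foldl (fun p v =>
      if v == 2 then (p.1 + 1, p.2)
      else if 3 ≤ v then (p.1, p.2 + 1)
      else p) (a, b)
      = (a + (vals.countP sgcsQ2 : Int), b + (vals.countP sgcsQ3 : Int)) := by
  induction vals with
  | nil => intro a b; simp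
  | cons v t ih =>
    intro a b
    simp only [List.foldl_cons, List.countP_cons]
    by_cases h2 : v = 2
    · rw [if_pos (by simp [h2]), ih]
      refine Prod.ext ?_ ?_ <;> simp [sgcsQ2, sgcsQ3, h2] <;> ring
    · rw [if_neg (by simp [h2])]
      by_cases h3 : 3 ≤ v
      · rw [if_pos h3, ih]
        refine Prod.ext ?_ ?_ <;> simp [sgcsQ2, sgcsQ3, h2, h3] <;> ring
      · rw [if_neg h3, ih]
        refine Prod.ext ?_ ?_ <;> simp [sgcsQ2, sgcsQ3, h2, h3]

-- ===== VERDICT (by name: the statement is the Claim_ definition above) =====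
theorem ShuangGuaiChongSan_spec : Claim_equal_ShuangGuaiChongSan := by
  unfold Claim_equal_ShuangGuaiChongSan
  intro cards _ hpre
  unfold Spec_ShuangGuaiChongSan
  have hkeys : sgcsInit.keys = ["2","3","4","5","6","7","8","9","10","J","Q","K","A"] := by decide
  have hnd : sgcsInit.keys.Nodup := by decide
  have hmem : ∀ x ∈ cards, sgcsStrip x ∈ sgcsInit.keys := fun x hx => hkeys ▸ hpre x hx
  have hA : ShuangGuaiChongSan cards =
      (if (cards.foldl sgcsStepA (sgcsInit, 0, 0)).2.1 == 3 && (cards.foldl sgcsStepA (sgcsInit, 0, 0)).2.2 == 2 then true else false) := rfl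
  have hB : ShuangGuaiChongSan_alt cards =
      decide (((cards.foldl sgcsStepD sgcsInit).values.foldl (fun p v =>
        if v == 2 then (p.1 + 1, p.2)
        else if 3 ≤ v then (p.1, p.2 + 1)
        else p) ((0 : Int), (0 : Int))).1 = 3 ∧ (((cards.foldl sgcsStepD sgcsInit).values.foldl (fun p v =>
        if v == 2 then (p.1 + 1, p.2)
        else if 3 ≤ v then (p.1, p.2 + 1)
        else p) ((0 : Int), (0 : Int))).2 = 2)) := rfl
  rw [hA, hB, loopA cards sgcsInit 0 0 hnd hmem, loopB]
  have h20 : sgcsInit.values.countP sgcsQ2 = 0 := by decide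
  have h30 : sgcsInit.values.countP sgcsQ3 = 0 := by decide
  simp [h20, h30]
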